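-- pv_equiv track=rewrite | github.com/denmd/DSA | DSA/ARRAYS/Number of Subsequences That Satisfy the Given Sum Condition/cNumber of Subsequences That Satisfy the Given Sum Condition.py | numSubseq
-- ===== SOURCE A (Python) =====
-- def numSubseq(nums, target):
--     """
--     :type nums: List[int]
--     :type target: int
--     :rtype: int
--     """
--     i=0
--     j=len(nums)-1
--     cnt=0
--     nums.sort()
--     mod=10**9 + 7
--     while i<=j:
--         if  nums[i]+nums[j]>target:
--             j-=1
--         else:
--             cnt+=pow(2,j-i,mod)
--             i+=1
--     return cnt % mod
-- ===== SOURCE B (Python) =====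
-- def numSubseq(nums, target):
--     """
--     :type nums: List[int]
--     :type target: int
--     :rtype: int
--     """
--     nums.sort()
--     n = len(nums)
--     mod = 10 ** 9 + 7
--
--     def bisect_right(a, x):
--         # rightmost insertion point: number of elements <= x in the sorted list
--         lo, hi = 0, len(a)
--         while lo < hi:
--             mid = (lo + hi) // 2
--             if x < a[mid]:
--                 hi = mid
--             else:
--                 lo = mid + 1
--         return lo
--
--     cnt = 0
--     for i in range(n):
--         j = bisect_right(nums, target - nums[i]) - 1
--         if j >= i:
--             cnt += pow(2, j - i, mod)
--     return cnt % mod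
-- ===== Notes on version B (the rewrite author's own statement) =====
-- stated objective: alternative
-- what changed: Replaces A's converging two-pointer sweep over the sorted array with an independent binary search (bisect_right) per element to find the largest partner index, summing pow(2, j-i, mod) for each valid i.
import Mathlib
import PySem

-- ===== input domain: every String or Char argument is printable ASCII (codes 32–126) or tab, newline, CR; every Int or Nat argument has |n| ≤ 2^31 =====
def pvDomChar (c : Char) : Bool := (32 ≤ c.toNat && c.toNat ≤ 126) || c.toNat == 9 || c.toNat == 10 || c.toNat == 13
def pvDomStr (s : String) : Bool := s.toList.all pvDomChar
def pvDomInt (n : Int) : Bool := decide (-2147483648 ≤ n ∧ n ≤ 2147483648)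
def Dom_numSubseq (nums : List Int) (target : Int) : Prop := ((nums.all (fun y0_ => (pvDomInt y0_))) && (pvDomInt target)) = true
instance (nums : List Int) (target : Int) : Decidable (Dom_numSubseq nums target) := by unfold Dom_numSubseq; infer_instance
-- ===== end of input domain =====

-- B replaces A's converging two-pointer sweep with an independent bisect_right per element
-- (alternative decomposition, same O(n log n) cost). Both A and B sort `nums` in place in
-- Python; the equivalence proved here is about the RETURN value (the ports are pure).


-- ===== PORT A =====
-- the `while i <= j` loop of A; terminates because j - i strictly decreases
def numSubseqLoop (s : List Int) (target : Int) (i j cnt : Int) : Int :=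
  if _h : i ≤ j then
    if PySem.List.pyGetD s i 0 + PySem.List.pyGetD s j 0 > target then
      numSubseqLoop s target i (j - 1) cnt
    else
      numSubseqLoop s target (i + 1) j (cnt + PySem.Int.powMod 2 (j - i).toNat (10 ^ 9 + 7))
  else cnt
termination_by (j - i + 1).toNat
decreasing_by all_goals omega

def numSubseq (nums : List Int) (target : Int) : Int :=
  let s := PySem.List.sorted nums (fun x => x) false
  PySem.Int.mod (numSubseqLoop s target 0 ((s.length : Int) - 1) 0) (10 ^ 9 + 7)

-- ===== PORT B =====
-- Source B's hand-written bisect_right is CPython's bisect_right algorithm; ported as the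
-- prelude's PySem.List.bisectRight (the same binary search).
def numSubseq_alt (nums : List Int) (target : Int) : Int :=
  let s := PySem.List.sorted nums (fun x => x) false
  let n := s.length
  let m : Int := 10 ^ 9 + 7
  let cnt := (PySem.List.pyRange 0 (n : Int) 1).foldl (fun cnt i =>
      let j : Int := (PySem.List.bisectRight s (target - PySem.List.pyGetD s i 0) : Int) - 1
      if j ≥ i then cnt + PySem.Int.powMod 2 (j - i).toNat m else cnt) 0
  PySem.Int.mod cnt m

-- ===== PRECONDITION & SPEC =====
def Spec_numSubseq (nums : List Int) (target : Int) (out : Int) : Prop := out = numSubseq_alt nums target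
instance (nums : List Int) (target : Int) (out : Int) : Decidable (Spec_numSubseq nums target out) := by unfold Spec_numSubseq; infer_instance

-- ===== CLAIM (what is proved, stated in full; the proofs are below) =====
def Claim_equal_numSubseq : Prop := ∀ (nums : List Int) (target : Int), Dom_numSubseq nums target → Spec_numSubseq nums target (numSubseq nums target)

-- ===== LEMMAS AND PROOFS =====

-- per-index contribution of B's loop body
def contribB (s : List Int) (target i : Int) : Int :=
  let j : Int := (PySem.List.bisectRight s (target - PySem.List.pyGetD s i 0) : Int) - 1
  if j ≥ i then PySem.Int.powMod 2 (j - i).toNat (10 ^ 9 + 7) else 0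

-- rank characterisation on a sorted list: s[j] ≤ x ↔ j < bisectRight s x
lemma rank_iff (s : List Int) (x : Int) (hs : s.Pairwise (· ≤ ·)) (j : Nat) (hj : j < s.length) :
    s[j] ≤ x ↔ j < PySem.List.bisectRight s x := by
  obtain ⟨_, h1, h2⟩ := PySem.List.bisectRight_spec s x hs
  constructor
  · intro h
    by_contra hc
    exact absurd h (not_le.mpr (h2 j hj (by omega)))
  · intro h; exact h1 j hj h

lemma bisect_mono (s : List Int) (x x' : Int) (hs : s.Pairwise (· ≤ ·)) (hxx : x ≤ x') :
    PySem.List.bisectRight s x ≤ PySem.List.bisectRight s x' := by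
  obtain ⟨hr, h1, _⟩ := PySem.List.bisectRight_spec s x hs
  by_contra hc
  have hk : PySem.List.bisectRight s x' < s.length := by omega
  have hle : s[PySem.List.bisectRight s x'] ≤ x := h1 _ hk (by omega)
  have := (rank_iff s x' hs _ hk).mp (le_trans hle hxx)
  omega

lemma sorted_getElem_mono (s : List Int) (hs : s.Pairwise (· ≤ ·)) (a b : Nat)
    (hab : a ≤ b) (hb : b < s.length) : s[a] ≤ s[b] := by
  rcases Nat.lt_or_ge a b with h | h
  · exact List.pairwise_iff_getElem.mp hs a b (by omega) hb h
  · have : a = b := by omega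
    subst this; exact le_refl _

-- J-monotonicity packaged for Int indices
lemma contrib_J_mono (s : List Int) (t : Int) (hs : s.Pairwise (· ≤ ·)) (i k : Int)
    (h0 : 0 ≤ i) (hik : i ≤ k) (hk : k < (s.length : Int)) :
    (PySem.List.bisectRight s (t - PySem.List.pyGetD s k 0) : Int) ≤
      (PySem.List.bisectRight s (t - PySem.List.pyGetD s i 0) : Int) := by
  rw [PySem.List.pyGetD_eq_getElem s 0 h0 (by omega),
      PySem.List.pyGetD_eq_getElem s 0 (by omega) hk]
  have hsk : s[i.toNat] ≤ s[k.toNat] :=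
    sorted_getElem_mono s hs i.toNat k.toNat (by omega) (by omega)
  exact_mod_cast bisect_mono s _ _ hs (by omega)

-- the core loop invariant: A's loop computes B's per-index sum over the remaining indices
lemma loop_eq (s : List Int) (t : Int) (hs : s.Pairwise (· ≤ ·)) :
    ∀ (m : Nat) (i j cnt : Int), (j - i + 1).toNat ≤ m → 0 ≤ i → i ≤ j + 1 →
      j < (s.length : Int) →
      (i < (s.length : Int) →
        (PySem.List.bisectRight s (t - PySem.List.pyGetD s i 0) : Int) - 1 ≤ j) →
      numSubseqLoop s t i j cnt =
        cnt + ((PySem.List.pyRange i (s.length : Int) 1).map (contribB s t)).sum := by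
  intro m
  induction m with
  | zero =>
    intro i j cnt hm h0 hij1 hjn hinv
    have hji : j < i := by omega
    rw [numSubseqLoop, dif_neg (by omega)]
    have hz : ∀ y ∈ (PySem.List.pyRange i (s.length : Int) 1).map (contribB s t), y = 0 := by
      intro y hy
      obtain ⟨k, hk, rfl⟩ := List.mem_map.mp hy
      have hk' := (PySem.List.mem_pyRange_one).mp hk
      have hJk := contrib_J_mono s t hs i k h0 hk'.1 hk'.2
      have hJi := hinv (by omega)
      unfold contribB
      simp only []
      rw [if_neg (by omega)]
    rw [List.sum_eq_zero hz]; ring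
  | succ m ih =>
    intro i j cnt hm h0 hij1 hjn hinv
    by_cases hij : i ≤ j
    · have hin : i < (s.length : Int) := by omega
      have hiN : i.toNat < s.length := by omega
      have hjN : j.toNat < s.length := by omega
      have hgi : PySem.List.pyGetD s i 0 = s[i.toNat] :=
        PySem.List.pyGetD_eq_getElem s 0 (by omega) (by omega)
      have hgj : PySem.List.pyGetD s j 0 = s[j.toNat] :=
        PySem.List.pyGetD_eq_getElem s 0 (by omega) (by omega)
      have hrank := rank_iff s (t - PySem.List.pyGetD s i 0) hs j.toNat hjN
      rw [numSubseqLoop, dif_pos hij]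
      by_cases hgt : PySem.List.pyGetD s i 0 + PySem.List.pyGetD s j 0 > t
      · rw [if_pos hgt]
        have hJlt : ¬ ((j.toNat : Int) < (PySem.List.bisectRight s (t - PySem.List.pyGetD s i 0) : Int)) := by
          intro hc
          have := hrank.mpr (by exact_mod_cast hc)
          omega
        rw [Int.ofNat_lt] at hJlt
        have hJlt' : (PySem.List.bisectRight s (t - PySem.List.pyGetD s i 0) : Int) ≤ j := by
          have := Nat.le_of_not_lt hJlt
          omega
        exact ih i (j - 1) cnt (by omega) h0 (by omega) (by omega) (fun _ => by omega)
      · rw [if_neg hgt]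
        have hJgt : j.toNat < PySem.List.bisectRight s (t - PySem.List.pyGetD s i 0) :=
          hrank.mp (by omega)
        have hJi := hinv hin
        have hJeq : (PySem.List.bisectRight s (t - PySem.List.pyGetD s i 0) : Int) - 1 = j := by
          omega
        rw [show PySem.List.pyRange i (s.length : Int) 1
              = i :: PySem.List.pyRange (i + 1) (s.length : Int) 1
            from PySem.List.pyRange_one_cons (by omega), List.map_cons, List.sum_cons]
        rw [ih (i + 1) j (cnt + PySem.Int.powMod 2 (j - i).toNat (10 ^ 9 + 7)) (by omega)
          (by omega) (by omega) hjn
          (fun h1 => by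
            have := contrib_J_mono s t hs i (i + 1) h0 (by omega) h1
            omega)]
        have hci : contribB s t i = PySem.Int.powMod 2 (j - i).toNat (10 ^ 9 + 7) := by
          unfold contribB
          simp only []
          rw [hJeq, if_pos (by omega)]
        rw [hci]; ring
    · rw [numSubseqLoop, dif_neg hij]
      have hz : ∀ y ∈ (PySem.List.pyRange i (s.length : Int) 1).map (contribB s t), y = 0 := by
        intro y hy
        obtain ⟨k, hk, rfl⟩ := List.mem_map.mp hy
        have hk' := (PySem.List.mem_pyRange_one).mp hk
        have hJk := contrib_J_mono s t hs i k h0 hk'.1 hk'.2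
        have hJi := hinv (by omega)
        unfold contribB
        simp only []
        rw [if_neg (by omega)]
      rw [List.sum_eq_zero hz]; ring

lemma alt_foldl_eq_sum (s : List Int) (t : Int) :
    (PySem.List.pyRange 0 (s.length : Int) 1).foldl (fun cnt i =>
      let j : Int := (PySem.List.bisectRight s (t - PySem.List.pyGetD s i 0) : Int) - 1
      if j ≥ i then cnt + PySem.Int.powMod 2 (j - i).toNat (10 ^ 9 + 7) else cnt) 0 =
    ((PySem.List.pyRange 0 (s.length : Int) 1).map (contribB s t)).sum := by
  have hbody : (fun (cnt i : Int) =>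
      let j : Int := (PySem.List.bisectRight s (t - PySem.List.pyGetD s i 0) : Int) - 1
      if j ≥ i then cnt + PySem.Int.powMod 2 (j - i).toNat (10 ^ 9 + 7) else cnt) =
      (fun cnt i => cnt + contribB s t i) := by
    funext cnt i
    unfold contribB
    simp only []
    split_ifs <;> ring
  rw [hbody, PySem.List.foldl_add]
  ring

-- ===== VERDICT (by name: the statement is the Claim_ definition above) =====
theorem numSubseq_spec : Claim_equal_numSubseq := by
  intro nums target _
  unfold Spec_numSubseq numSubseq numSubseq_alt
  simp only []
  set s := PySem.List.sorted nums (fun x => x) false with hsdef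
  have hs : s.Pairwise (· ≤ ·) := PySem.List.sorted_pairwise nums (fun x => x)
  rw [alt_foldl_eq_sum s target]
  congr 1
  have hr := (PySem.List.bisectRight_spec s (target - PySem.List.pyGetD s 0 0) hs).1
  have := loop_eq s target hs ((((s.length : Int) - 1) - 0 + 1).toNat) 0 ((s.length : Int) - 1) 0
    (le_refl _) (le_refl _) (by omega) (by omega) (fun _ => by omega)
  rw [this]; ring
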